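-- pv_equiv track=rewrite | github.com/lamalgopach/codeforces | Hackerrank/marc_cakewalk.py | marcsCakewalk
-- ===== SOURCE A (Python) =====
-- def marcsCakewalk(calories):
--
-- 	calories = sorted(calories)
-- 	miles = 0
-- 	k = 0
--
-- 	for i in range(len(calories) - 1, -1, -1):
--
-- 		miles += calories[i] * (2 ** k)
-- 		k += 1
--
-- 	return miles
-- ===== SOURCE B (Python) =====
-- def marcsCakewalk(calories):
--     # Selection-based: no sort call and no powers of two. Repeatedly extract the
--     # current minimum and double the running total before adding it, so the j-th
--     # smallest calorie ends up weighted by 2**(n-1-j), the minimizing assignment.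
--     items = list(calories)
--     total = 0
--     while items:
--         m = min(items)
--         items.remove(m)
--         total = total * 2 + m
--     return total
-- ===== Notes on version B (the rewrite author's own statement) =====
-- stated objective: alternative
-- what changed: Replaces sort-then-weighted-sum (explicit 2**k powers over a reversed index range) by repeated minimum extraction from the unsorted list with a doubling accumulator: no sort, no index arithmetic, no powers.
import Mathlib
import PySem

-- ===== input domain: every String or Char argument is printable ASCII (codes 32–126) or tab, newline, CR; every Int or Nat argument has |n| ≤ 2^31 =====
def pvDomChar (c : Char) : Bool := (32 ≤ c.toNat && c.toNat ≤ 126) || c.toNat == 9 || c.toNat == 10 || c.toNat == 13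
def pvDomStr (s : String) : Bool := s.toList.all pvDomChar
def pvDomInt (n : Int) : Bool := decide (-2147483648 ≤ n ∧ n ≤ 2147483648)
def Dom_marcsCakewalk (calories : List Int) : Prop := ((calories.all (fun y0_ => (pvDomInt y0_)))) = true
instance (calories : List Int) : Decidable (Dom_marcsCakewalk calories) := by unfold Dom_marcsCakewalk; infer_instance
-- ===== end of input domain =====

-- B replaces A's sort + reverse-indexed loop with explicit 2**k powers by repeated
-- minimum extraction from the unsorted list with a doubling accumulator (alternative algorithm).

-- ===== PORT A =====
def marcsCakewalk (calories : List Int) : Int :=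
  let cs := PySem.List.sorted calories (fun x => x) false
  let st := (PySem.List.pyRange ((cs.length : Int) - 1) (-1) (-1)).foldl
    (fun (st : Int × Nat) i => (st.1 + PySem.List.pyGetD cs i 0 * 2 ^ st.2, st.2 + 1)) (0, 0)
  st.1

-- ===== PORT B =====
-- while items: m = min(items); items.remove(m); total = total*2 + m
def selLoop (items : List Int) (total : Int) : Int :=
  match h : PySem.List.min? items (fun x => x) with
  | none => total
  | some m =>
    match h2 : PySem.List.remove? items m with
    | none => total   -- unreachable: min(items) ∈ items
    | some rest => selLoop rest (total * 2 + m)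
termination_by items.length
decreasing_by
  have hm : m ∈ items := PySem.List.min?_mem h
  have : rest = items.erase m := by
    have := PySem.List.remove?_eq_some_erase items m hm
    rw [this] at h2; exact (Option.some.injEq _ _).mp h2.symm
  subst this
  exact (List.length_erase_of_mem hm) ▸ Nat.sub_lt (List.length_pos_of_mem hm) Nat.one_pos

def marcsCakewalk_alt (calories : List Int) : Int :=
  selLoop calories 0

-- ===== PRECONDITION & SPEC =====
def Spec_marcsCakewalk (calories : List Int) (out : Int) : Prop := out = marcsCakewalk_alt calories
instance (calories : List Int) (out : Int) : Decidable (Spec_marcsCakewalk calories out) := by unfold Spec_marcsCakewalk; infer_instance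

-- ===== CLAIM (what is proved, stated in full; the proofs are below) =====
def Claim_equal_marcsCakewalk : Prop := ∀ (calories : List Int), Dom_marcsCakewalk calories → Spec_marcsCakewalk calories (marcsCakewalk calories)

-- ===== LEMMAS AND PROOFS =====

-- Folding A's body over any list of values from state (m, k) yields m plus 2^k times
-- the Horner fold of the reversed list.
theorem pvHornerAux (ds : List Int) (m : Int) (k : Nat) :
    (ds.foldl (fun (st : Int × Nat) c => (st.1 + c * 2 ^ st.2, st.2 + 1)) (m, k)).1
      = m + 2 ^ k * (ds.reverse.foldl (fun total c => total * 2 + c) 0) := by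
  induction ds generalizing m k with
  | nil => simp
  | cons c ds ih =>
      simp only [List.foldl_cons, List.reverse_cons, List.foldl_append, List.foldl_nil]
      rw [ih]
      ring

-- A computes the Horner fold of the ascending-sorted list.
theorem pvA_eq_horner (calories : List Int) :
    marcsCakewalk calories
      = (PySem.List.sorted calories (fun x => x) false).foldl
          (fun total c => total * 2 + c) 0 := by
  simp only [marcsCakewalk]
  generalize PySem.List.sorted calories (fun x => x) false = cs
  have hr : PySem.List.pyRange ((cs.length : Int) - 1) (-1) (-1)
      = (PySem.List.pyRange 0 (cs.length : Int) 1).reverse := by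
    rw [PySem.List.pyRange_neg_one_eq_reverse]
    norm_num
  have hm : ((PySem.List.pyRange 0 (cs.length : Int) 1).reverse).map
      (fun i => PySem.List.pyGetD cs i 0) = cs.reverse := by
    rw [List.map_reverse, PySem.List.map_pyGetD_pyRange_zero']
  rw [hr, ← List.foldl_map (f := fun i => PySem.List.pyGetD cs i 0)
        (g := fun (st : Int × Nat) c => (st.1 + c * 2 ^ st.2, st.2 + 1)),
    hm, pvHornerAux, List.reverse_reverse]
  simp

-- Extracting the minimum peels the head off the ascending sort.
theorem pvSorted_min (items : List Int) (m : Int)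
    (h : PySem.List.min? items (fun x => x) = some m) :
    PySem.List.sorted items (fun x => x) false
      = m :: PySem.List.sorted (items.erase m) (fun x => x) false := by
  have hm : m ∈ items := PySem.List.min?_mem h
  have hmin : ∀ y ∈ items, m ≤ y := PySem.List.min?_isMin h
  apply PySem.List.sorted_id_eq_of_perm_of_pairwise
  · exact ((PySem.List.sorted_perm _ _ _).cons m).trans (List.perm_cons_erase hm).symm
  · refine List.pairwise_cons.mpr ⟨?_, PySem.List.sorted_pairwise _ _⟩
    intro y hy
    exact hmin y (List.mem_of_mem_erase ((PySem.List.mem_sorted _ _ _ _).mp hy))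

-- B's extraction loop is the Horner fold over the ascending-sorted list.
theorem pvSelLoop_eq (items : List Int) (total : Int) :
    selLoop items total
      = (PySem.List.sorted items (fun x => x) false).foldl
          (fun t c => t * 2 + c) total := by
  induction hn : items.length using Nat.strong_induction_on generalizing items total with
  | _ n ih =>
    rw [selLoop.eq_def]
    split
    · next h =>
        have : items = [] := (PySem.List.min?_eq_none_iff _ _).mp h
        subst this; simp [PySem.List.sorted]
    · next m h =>
        have hm : m ∈ items := PySem.List.min?_mem h
        split
        · next h2 =>
            exact absurd ((PySem.List.remove?_eq_none_iff _ _).mp h2) (by simpa using hm)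
        · next rest h2 =>
            have hrest : rest = items.erase m := by
              have := PySem.List.remove?_eq_some_erase items m hm
              rw [this] at h2; exact (Option.some.injEq _ _).mp h2.symm
            subst hrest
            have hlt : (items.erase m).length < n := by
              subst hn
              exact (List.length_erase_of_mem hm) ▸ Nat.sub_lt (List.length_pos_of_mem hm) Nat.one_pos
            rw [ih _ hlt _ _ rfl, pvSorted_min items m h]
            simp

-- ===== VERDICT (by name: the statement is the Claim_ definition above) =====
theorem marcsCakewalk_spec : Claim_equal_marcsCakewalk := by
  intro calories _
  show marcsCakewalk calories = marcsCakewalk_alt calories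
  rw [pvA_eq_horner, marcsCakewalk_alt, pvSelLoop_eq]
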